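-- pv_equiv track=rewrite | github.com/NikosEfth/im2rbte | utils.py | make_mask
-- ===== SOURCE A (Python) =====
-- def make_mask(train_class_list, test_class_list):
--     mask = []
--     for i in train_class_list:
--         if i in test_class_list:
--             mask.append(1)
--         else:
--             mask.append(0)
--     return mask
-- ===== SOURCE B (Python) =====
-- def make_mask(train_class_list, test_class_list):
--     mask = [0] * len(train_class_list)
--     positions = {}
--     for idx, v in enumerate(train_class_list):
--         positions.setdefault(v, []).append(idx)
--     for v in test_class_list:
--         for idx in positions.get(v, []):
--             mask[idx] = 1
--     return mask
-- ===== Notes on version B (the rewrite author's own statement) =====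
-- stated objective: faster
-- what changed: B prebuilds a value-to-indices dict over the train list in one pass and drives the traversal from the test list, setting mask positions, instead of A's per-train-element linear scan of the test list.
import Mathlib
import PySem

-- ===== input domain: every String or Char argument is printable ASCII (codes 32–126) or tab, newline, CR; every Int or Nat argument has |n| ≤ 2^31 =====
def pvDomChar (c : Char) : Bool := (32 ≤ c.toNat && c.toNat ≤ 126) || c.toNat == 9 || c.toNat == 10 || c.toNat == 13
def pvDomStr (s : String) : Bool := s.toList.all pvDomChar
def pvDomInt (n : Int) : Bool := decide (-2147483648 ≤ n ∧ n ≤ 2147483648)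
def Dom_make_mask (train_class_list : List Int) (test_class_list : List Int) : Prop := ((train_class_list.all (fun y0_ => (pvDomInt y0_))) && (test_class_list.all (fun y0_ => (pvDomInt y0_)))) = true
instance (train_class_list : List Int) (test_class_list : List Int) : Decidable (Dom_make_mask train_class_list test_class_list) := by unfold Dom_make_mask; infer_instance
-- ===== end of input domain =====

-- B replaces A's per-train-element scan of the test list by a prebuilt value→indices
-- dict and a traversal driven from the test list (objective: faster).

-- ===== PORT A =====
-- mask = []; for i in train: mask.append(1 if i in test else 0)
def make_mask (train_class_list : List Int) (test_class_list : List Int) : List Int :=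
  train_class_list.foldl
    (fun mask i => mask ++ [if test_class_list.contains i then 1 else 0]) []

-- ===== PORT B =====
-- positions = {}; for idx, v in enumerate(train): positions.setdefault(v, []).append(idx)
def mm_positions (train_class_list : List Int) : PySem.Dict Int (List Int) :=
  (PySem.List.enumerate train_class_list).foldl
    (fun d p => d.modify p.2 [] (· ++ [p.1])) PySem.Dict.empty

-- mask = [0]*len(train); for v in test: for idx in positions.get(v, []): mask[idx] = 1
def make_mask_alt (train_class_list : List Int) (test_class_list : List Int) : List Int :=
  test_class_list.foldl
    (fun mask v =>
      ((mm_positions train_class_list).getD v []).foldl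
        (fun m idx => PySem.List.pySetD m idx 1) mask)
    (List.replicate train_class_list.length 0)

-- ===== PRECONDITION & SPEC =====
def Spec_make_mask (train_class_list : List Int) (test_class_list : List Int) (out : List Int) : Prop := out = make_mask_alt train_class_list test_class_list
instance (train_class_list : List Int) (test_class_list : List Int) (out : List Int) : Decidable (Spec_make_mask train_class_list test_class_list out) := by unfold Spec_make_mask; infer_instance

-- ===== CLAIM (what is proved, stated in full; the proofs are below) =====
def Claim_equal_make_mask : Prop := ∀ (train_class_list : List Int) (test_class_list : List Int), Dom_make_mask train_class_list test_class_list → Spec_make_mask train_class_list test_class_list (make_mask train_class_list test_class_list)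

-- ===== LEMMAS AND PROOFS =====

-- membership in enumerate: (k, x) ∈ enumerate xs s ↔ some index j with k = s + j, xs[j]? = some x
theorem mm_mem_enumerate (xs : List Int) (s k x : Int) :
    (k, x) ∈ PySem.List.enumerate xs s ↔
      ∃ j : Nat, k = s + j ∧ xs[j]? = some x := by
  induction xs generalizing s with
  | nil => simp [PySem.List.enumerate_nil]
  | cons a t ih =>
    simp only [PySem.List.enumerate_cons, List.mem_cons, ih, Prod.mk.injEq]
    constructor
    · rintro (⟨hk, hx⟩ | ⟨j, hk, hj⟩)
      · exact ⟨0, by omega, by simp [hx]⟩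
      · exact ⟨j + 1, by push_cast; omega, by simpa using hj⟩
    · rintro ⟨j, hk, hj⟩
      cases j with
      | zero => left; exact ⟨by omega, by simpa using hj.symm⟩
      | succ j => right; exact ⟨j, by push_cast at hk ⊢; omega, by simpa using hj⟩

-- the positions dict maps v to the list of indices of v in train
theorem mm_positions_getD (train : List Int) (v : Int) :
    (mm_positions train).getD v [] =
      (((PySem.List.enumerate train).map (fun p => (p.2, p.1))).filter
        (fun p => p.1 == v)).map (·.2) := by
  have h : ((PySem.List.enumerate train).map (fun p => (p.2, p.1))).foldl
        (fun (d : PySem.Dict Int (List Int)) q => d.modify q.1 [] (· ++ [q.2]))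
        PySem.Dict.empty =
      (PySem.List.enumerate train).foldl
        (fun d p => d.modify p.2 [] (· ++ [p.1])) PySem.Dict.empty :=
    List.foldl_map (f := fun p : Int × Int => (p.2, p.1))
      (g := fun (d : PySem.Dict Int (List Int)) q => d.modify q.1 [] (· ++ [q.2]))
      (l := PySem.List.enumerate train) (init := PySem.Dict.empty)
  unfold mm_positions
  rw [← h, PySem.Dict.getD_foldl_modify_append]
  simp

-- an index occurs in positions[train[j]] exactly at the valid indices holding that value
theorem mm_mem_positions (train : List Int) (v k : Int) :
    k ∈ (mm_positions train).getD v [] ↔ ∃ j : Nat, k = (j : Int) ∧ train[j]? = some v := by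
  rw [mm_positions_getD]
  simp only [List.mem_map, List.mem_filter, List.mem_map, beq_iff_eq]
  constructor
  · rintro ⟨x, ⟨⟨p, hm, he⟩, hv⟩, hk⟩
    obtain ⟨c, d⟩ := p
    subst he
    simp only at hv hk
    subst hv hk
    rcases (mm_mem_enumerate train 0 c d).mp hm with ⟨j, hj1, hj2⟩
    exact ⟨j, by omega, hj2⟩
  · rintro ⟨j, hk, hj⟩
    refine ⟨(v, k), ⟨⟨(k, v), ?_, rfl⟩, rfl⟩, rfl⟩
    exact (mm_mem_enumerate train 0 k v).mpr ⟨j, by omega, hj⟩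

theorem mm_mem_positions' (train : List Int) (v : Int) (j : Nat) (hj : j < train.length) :
    ((j : Int) ∈ (mm_positions train).getD v []) ↔ train[j] = v := by
  rw [mm_mem_positions]
  constructor
  · rintro ⟨a, ha, ha2⟩
    have : a = j := by omega
    subst this
    simpa [List.getElem?_eq_getElem hj] using ha2
  · intro h
    exact ⟨j, rfl, by simp [List.getElem?_eq_getElem hj, h]⟩

-- setting a list of in-range indices to 1: pointwise description
theorem mm_setOnes_getElem (idxs : List Int) (m : List Int)
    (hb : ∀ i ∈ idxs, 0 ≤ i ∧ i < (m.length : Int)) (j : Nat) (hj : j < m.length) :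
    (idxs.foldl (fun m i => PySem.List.pySetD m i 1) m)[j]? =
      some (if (j : Int) ∈ idxs then 1 else m[j]) := by
  induction idxs generalizing m with
  | nil => simp [List.getElem?_eq_getElem hj]
  | cons i t ih =>
    obtain ⟨h0, h1⟩ := hb i (by simp)
    simp only [List.foldl_cons]
    rw [PySem.List.pySetD_of_nonneg m 1 h0]
    have hlen : (m.set i.toNat 1).length = m.length := by simp
    rw [ih _ (by intro a ha; simpa [hlen] using hb a (by simp [ha])) (by omega)]
    by_cases hji : (j : Int) = i
    · have hij : i.toNat = j := by omega
      simp [hij, hji]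
    · have hne : i.toNat ≠ j := by omega
      simp only [List.mem_cons, hji, false_or]
      rw [List.getElem_set_ne hne]

-- lengths are preserved by the inner index loop
theorem mm_setOnes_length (idxs : List Int) (m : List Int) :
    (idxs.foldl (fun m i => PySem.List.pySetD m i 1) m).length = m.length := by
  induction idxs generalizing m with
  | nil => rfl
  | cons i t ih => simp [List.foldl_cons, ih, PySem.List.length_pySetD]

-- pointwise description of B's outer loop over the test list
theorem mm_alt_loop_getElem (train : List Int) (ts : List Int) (m : List Int)
    (hlen : m.length = train.length) (j : Nat) (hj : j < m.length) :
    (ts.foldl (fun mask v => ((mm_positions train).getD v []).foldl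
        (fun m idx => PySem.List.pySetD m idx 1) mask) m)[j]? =
      some (if train[j]'(by omega) ∈ ts then 1 else m[j]) := by
  induction ts generalizing m with
  | nil => simp [List.getElem?_eq_getElem hj]
  | cons v t ih =>
    simp only [List.foldl_cons]
    have hb : ∀ i ∈ (mm_positions train).getD v [], 0 ≤ i ∧ i < (m.length : Int) := by
      intro i hi
      rcases (mm_mem_positions train v i).mp hi with ⟨a, ha, ha2⟩
      obtain ⟨hlt, -⟩ := List.getElem?_eq_some_iff.mp ha2
      omega
    have hl2 : (((mm_positions train).getD v []).foldl
        (fun m idx => PySem.List.pySetD m idx 1) m).length = m.length :=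
      mm_setOnes_length _ _
    rw [ih _ (by omega) (by omega)]
    have hji : j < (((mm_positions train).getD v []).foldl
        (fun m idx => PySem.List.pySetD m idx 1) m).length := by omega
    have hval : (((mm_positions train).getD v []).foldl
        (fun m idx => PySem.List.pySetD m idx 1) m)[j]'hji =
        if (j : Int) ∈ (mm_positions train).getD v [] then 1 else m[j] := by
      have := mm_setOnes_getElem _ m hb j hj
      rw [List.getElem?_eq_getElem hji] at this
      exact Option.some.inj this
    simp only [hval, mm_mem_positions' train v j (by omega)]
    by_cases ht : train[j]'(by omega) ∈ t
    · simp [ht]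
    · by_cases hv : train[j]'(by omega) = v
      · simp [hv]
      · simp [ht, hv]

-- A's fold is the membership map over train
theorem mm_A_eq_map (train test : List Int) :
    make_mask train test = train.map (fun i => if test.contains i then 1 else 0) := by
  unfold make_mask
  simpa using PySem.List.foldl_append_singleton_eq_map
    (fun i => if test.contains i then (1 : Int) else 0) train []

-- ===== VERDICT (by name: the statement is the Claim_ definition above) =====
theorem make_mask_spec : Claim_equal_make_mask := by
  intro train test hdom
  clear hdom
  show make_mask train test = make_mask_alt train test
  rw [mm_A_eq_map]
  have hlenB : (make_mask_alt train test).length = train.length := by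
    unfold make_mask_alt
    generalize hgen : List.replicate train.length (0 : Int) = m
    have hm : m.length = train.length := by rw [← hgen]; simp
    clear hgen
    induction test generalizing m with
    | nil => simpa
    | cons v t ih =>
      simp only [List.foldl_cons]
      exact ih _ (by rw [mm_setOnes_length]; exact hm)
  apply List.ext_getElem?
  intro j
  by_cases hj : j < train.length
  · have h1 : (train.map (fun i => if test.contains i then (1 : Int) else 0))[j]? =
        some (if test.contains (train[j]'hj) then 1 else 0) := by
      simp [List.getElem?_eq_getElem hj]
    have h2 := mm_alt_loop_getElem train test (List.replicate train.length 0)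
      (by simp) j (by simpa)
    rw [h1]
    unfold make_mask_alt
    rw [h2]
    simp
  · rw [List.getElem?_eq_none (by simpa using hj),
        List.getElem?_eq_none (by omega)]
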